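-- pv_equiv track=rewrite | github.com/Murcurrent/The-Huima-Incident | npc_exploration.py | _match_best_theory
-- ===== SOURCE A (Python) =====
-- from typing import Dict, List
--
-- def _match_best_theory(discovered: List[str], theories: Dict) -> Dict:
--     """
--     从推断模板中匹配最佳的一条。
--     优先匹配组合线索（key 含 '+'），其次单条线索。
--     返回匹配的 theory dict，或 None。
--     """
--     best = None
--     best_count = 0  # 匹配的线索数量，越多越优先
--
--     discovered_set = set(discovered)
--
--     for key, theory_data in theories.items():
--         if "+" in key:
--             # 组合线索
--             required = set(key.split("+"))
--             if required.issubset(discovered_set):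
--                 if len(required) > best_count:
--                     best = theory_data
--                     best_count = len(required)
--         else:
--             # 单条线索
--             if key in discovered_set:
--                 if best_count < 1:
--                     best = theory_data
--                     best_count = 1
--                 # 单条不覆盖已有的组合匹配
--
--     return best
-- ===== SOURCE B (Python) =====
-- from typing import Dict, List
--
--
-- def _clue_set(key: str) -> set:
--     # set of individual clues named by a key ('a+b' -> {'a','b'}, 'a' -> {'a'})
--     return set(key.split("+"))
--
--
-- def _match_best_theory(discovered: List[str], theories: Dict) -> Dict:
--     """Sort the theories by decreasing clue-set size (stable), return the first
--     whose clue set is covered by the discovered clues; None if none is."""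
--     s = set(discovered)
--     for key, theory_data in sorted(theories.items(),
--                                    key=lambda kv: -len(_clue_set(kv[0]))):
--         if _clue_set(key) <= s:
--             return theory_data
--     return None
-- ===== Notes on version B (the rewrite author's own statement) =====
-- stated objective: simpler
-- what changed: Replaces A's single max-tracking scan with two branches ('+' combo vs single key) by one uniform rule: stably sort the theories by decreasing size of set(key.split('+')) and return the first whose clue set is a subset of the discovered set.
import Mathlib
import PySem

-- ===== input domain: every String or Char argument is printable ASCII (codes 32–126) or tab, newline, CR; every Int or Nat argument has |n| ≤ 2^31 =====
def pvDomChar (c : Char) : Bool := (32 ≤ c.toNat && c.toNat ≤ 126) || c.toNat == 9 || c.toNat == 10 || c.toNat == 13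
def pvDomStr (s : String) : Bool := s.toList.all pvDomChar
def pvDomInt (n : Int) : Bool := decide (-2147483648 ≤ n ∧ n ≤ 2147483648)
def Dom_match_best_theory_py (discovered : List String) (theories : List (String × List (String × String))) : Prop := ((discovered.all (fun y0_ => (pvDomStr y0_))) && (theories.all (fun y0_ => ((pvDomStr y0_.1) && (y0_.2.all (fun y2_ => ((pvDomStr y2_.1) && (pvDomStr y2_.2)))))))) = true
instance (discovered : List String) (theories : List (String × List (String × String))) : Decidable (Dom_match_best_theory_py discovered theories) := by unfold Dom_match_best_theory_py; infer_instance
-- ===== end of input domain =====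

-- B replaces A's max-tracking scan with its two '+'-branches by one uniform rule: stably sort by
-- decreasing clue-set size and return the first theory whose clue set is covered (objective: simpler).

-- ===== PORT A =====
def match_best_theory_py (discovered : List String) (theories : List (String × List (String × String))) : Option (List (String × String)) :=
  let discoveredSet : PySem.Set String := PySem.Set.ofList discovered
  (theories.foldl
    (fun (st : Option (List (String × String)) × Int) kv =>
      if PySem.Str.isIn "+" kv.1 then
        -- 组合线索
        let required : PySem.Set String := PySem.Set.ofList ((PySem.Str.split? kv.1 "+").getD [])
        if PySem.Set.issubset required discoveredSet then
          if PySem.Set.len required > st.2 then (some kv.2, PySem.Set.len required) else st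
        else st
      else
        -- 单条线索
        if PySem.Set.contains discoveredSet kv.1 then
          if st.2 < 1 then (some kv.2, 1) else st
        else st)
    (none, 0)).1

-- ===== PORT B =====
-- set(key.split("+"))
def pvClueSet (key : String) : PySem.Set String :=
  PySem.Set.ofList ((PySem.Str.split? key "+").getD [])

-- the for-loop of Source B: first theory (in the given order) whose clue set is covered by s
def pvFirstCovered (s : PySem.Set String) : List (String × List (String × String)) → Option (List (String × String))
  | [] => none
  | kv :: rest => if PySem.Set.issubset (pvClueSet kv.1) s then some kv.2 else pvFirstCovered s rest

def match_best_theory_py_alt (discovered : List String) (theories : List (String × List (String × String))) : Option (List (String × String)) :=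
  let s : PySem.Set String := PySem.Set.ofList discovered
  pvFirstCovered s (PySem.List.sorted theories (fun kv => -(PySem.Set.len (pvClueSet kv.1))) false)

-- ===== PRECONDITION & SPEC =====
def Spec_match_best_theory_py (discovered : List String) (theories : List (String × List (String × String))) (out : Option (List (String × String))) : Prop := out = match_best_theory_py_alt discovered theories
instance (discovered : List String) (theories : List (String × List (String × String))) (out : Option (List (String × String))) : Decidable (Spec_match_best_theory_py discovered theories out) := by unfold Spec_match_best_theory_py; infer_instance

-- ===== CLAIM (what is proved, stated in full; the proofs are below) =====
def Claim_equal_match_best_theory_py : Prop := ∀ (discovered : List String) (theories : List (String × List (String × String))), Dom_match_best_theory_py discovered theories → Spec_match_best_theory_py discovered theories (match_best_theory_py discovered theories)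

-- ===== LEMMAS AND PROOFS =====

-- size of a clue set; positive (splitting never yields an empty list)
def pvSz (kv : String × List (String × String)) : Int := PySem.Set.len (pvClueSet kv.1)

-- matched: the clue set is covered by the discovered set
def pvM (s : PySem.Set String) (kv : String × List (String × String)) : Bool :=
  PySem.Set.issubset (pvClueSet kv.1) s

-- one step of the common "keep the first strict improver" accumulator
def pvH (s : PySem.Set String) (o : Option (String × List (String × String)))
    (kv : String × List (String × String)) : Option (String × List (String × String)) :=
  match o with
  | none => if pvM s kv then some kv else none
  | some y => if pvM s kv && decide (pvSz y < pvSz kv) then some kv else some y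

-- A's state is (value of the best item, its clue-set size), 0 when nothing matched yet
def pvEnc (o : Option (String × List (String × String))) :
    Option (List (String × String)) × Int :=
  (o.map Prod.snd, (o.map pvSz).getD 0)

lemma pvSplitOnGo_ne_nil (sep : List Char) :
    ∀ (fuel : Nat) (l cur : List Char) (acc : List (List Char)),
      PySem.Chars.splitOn.go sep fuel l cur acc ≠ [] := by
  intro fuel
  induction fuel with
  | zero => intro l cur acc; simp [PySem.Chars.splitOn.go]
  | succ f ih =>
      intro l cur acc
      cases l with
      | nil => simp [PySem.Chars.splitOn.go]
      | cons c rest =>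
          rw [PySem.Chars.splitOn.go]
          split
          · exact ih _ _ _
          · exact ih _ _ _

lemma pvSplitOnGo_not_infix (sep : List Char) :
    ∀ (l : List Char) (fuel : Nat) (cur : List Char) (acc : List (List Char)),
      ¬ sep <:+: l →
      PySem.Chars.splitOn.go sep fuel l cur acc = ((cur.reverse ++ l) :: acc).reverse := by
  intro l
  induction l with
  | nil =>
      intro fuel cur acc _
      cases fuel <;> simp [PySem.Chars.splitOn.go]
  | cons c rest ih =>
      intro fuel cur acc h
      cases fuel with
      | zero => simp [PySem.Chars.splitOn.go]
      | succ f =>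
          rw [PySem.Chars.splitOn.go]
          have hpre : sep.isPrefixOf (c :: rest) = false := by
            by_contra hc
            exact h (List.IsPrefix.isInfix (List.isPrefixOf_iff_prefix.mp
              (by revert hc; cases sep.isPrefixOf (c :: rest) <;> simp)))
          rw [if_neg (by simp [hpre])]
          rw [ih f (c :: cur) acc (fun hc => h (hc.trans (List.suffix_cons c rest).isInfix))]
          simp

lemma pvClueSet_ne_nil (key : String) : pvClueSet key ≠ [] := by
  have hgo := pvSplitOnGo_ne_nil ['+'] (key.toList.length + 1) key.toList [] []
  unfold pvClueSet PySem.Str.split? PySem.Chars.split? PySem.Chars.splitOn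
  simp only [show ("+" : String).toList = ['+'] from rfl]
  rw [if_neg (by simp)]
  cases hsp : PySem.Chars.splitOn.go ['+'] (key.toList.length + 1) key.toList [] [] with
  | nil => exact absurd hsp hgo
  | cons a t =>
      intro hcontra
      have : String.ofList a ∈ PySem.Set.ofList ((a :: t).map String.ofList) := by
        rw [PySem.Set.mem_ofList]; simp
      simp only [Option.map_some, Option.getD_some] at hcontra
      rw [hcontra] at this
      exact absurd this (by simp)

lemma pvSz_pos (kv : String × List (String × String)) : 1 ≤ pvSz kv := by
  have h := pvClueSet_ne_nil kv.1
  unfold pvSz PySem.Set.len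
  have : 0 < (pvClueSet kv.1).length := List.length_pos_iff.mpr h
  omega

lemma pvClueSet_no_plus (key : String) (h : PySem.Str.isIn "+" key = false) :
    pvClueSet key = [key] := by
  have hinf : ¬ (['+'] <:+: key.toList) := by
    have := PySem.Chars.isIn_eq_false_iff (sub := ("+" : String).toList) (s := key.toList)
    simp only [show ("+" : String).toList = ['+'] from rfl] at this
    exact this.mp (by simpa [PySem.Str.isIn] using h)
  have hgo := pvSplitOnGo_not_infix ['+'] key.toList (key.toList.length + 1) [] [] hinf
  unfold pvClueSet PySem.Str.split? PySem.Chars.split? PySem.Chars.splitOn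
  simp only [show ("+" : String).toList = ['+'] from rfl]
  rw [if_neg (by simp)]
  rw [hgo]
  simp [String.ofList_toList, PySem.Set.ofList, PySem.Set.add, PySem.Set.empty]

lemma pvFirstCovered_eq_find? (s : PySem.Set String)
    (L : List (String × List (String × String))) :
    pvFirstCovered s L = (L.find? (pvM s)).map Prod.snd := by
  induction L with
  | nil => rfl
  | cons kv rest ih =>
      by_cases hm : PySem.Set.issubset (pvClueSet kv.1) s
      · simp [pvFirstCovered, List.find?, pvM, hm]
      · simp only [pvFirstCovered, List.find?, pvM] at *
        simp [hm, ih]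

lemma pvFind?_insertBy {α : Type} (key : α → Int) (p : α → Bool) (x : α) (L : List α)
    (hL : L.Pairwise (fun a b => key a ≤ key b)) :
    (PySem.List.insertBy (fun a b => decide (key a < key b)) x L).find? p =
      match L.find? p with
      | none => if p x then some x else none
      | some y => if p x && decide (key x < key y) then some x else some y := by
  induction L with
  | nil => cases hp : p x <;> simp [PySem.List.insertBy, List.find?, hp]
  | cons y ys ih =>
      have hy : ∀ z ∈ ys, key y ≤ key z := (List.pairwise_cons.mp hL).1
      have hys := (List.pairwise_cons.mp hL).2
      by_cases hb : key x < key y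
      · rw [PySem.List.insertBy, if_pos (by simpa using hb)]
        cases hfind : (y :: ys).find? p with
        | none =>
            cases hp : p x <;> simp [List.find?_cons, hp, hfind]
        | some z =>
            have hz : z ∈ y :: ys := List.mem_of_find?_eq_some hfind
            have hkz : key x < key z := by
              rcases List.mem_cons.mp hz with h | h
              · exact h ▸ hb
              · exact lt_of_lt_of_le hb (hy z h)
            cases hp : p x <;> simp [hp, hfind, hkz]
      · rw [PySem.List.insertBy, if_neg (by simpa using hb)]
        cases hp : p y with
        | true =>
            simp [hp, hb]
        | false =>
            simp only [List.find?_cons, hp]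
            exact ih hys

lemma pvSortedFold (s : PySem.Set String) (t : List (String × List (String × String))) :
    ((PySem.List.sorted t (fun kv => -(PySem.Set.len (pvClueSet kv.1))) false).find? (pvM s)) =
      t.foldl (pvH s) none := by
  induction t using List.reverseRecOn with
  | nil => rfl
  | append_singleton l x ih =>
      have hkey : ∀ (u : List (String × List (String × String))),
          PySem.List.sorted u (fun kv => -(PySem.Set.len (pvClueSet kv.1))) false =
            u.foldl (fun acc z => PySem.List.insertBy
              (fun a b => decide ((-(PySem.Set.len (pvClueSet a.1))) < -(PySem.Set.len (pvClueSet b.1)))) z acc) [] :=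
        fun u => PySem.List.sorted_eq_foldl_insertBy u _
      rw [hkey, List.foldl_append, ← hkey]
      simp only [List.foldl_cons, List.foldl_nil]
      rw [pvFind?_insertBy (fun kv => -(PySem.Set.len (pvClueSet kv.1))) (pvM s) x _
        (PySem.List.sorted_pairwise l _)]
      rw [ih, List.foldl_append, List.foldl_cons, List.foldl_nil]
      cases hf : l.foldl (pvH s) none with
      | none => simp [pvH]
      | some y =>
          simp only [pvH]
          have hiff : ((-(PySem.Set.len (pvClueSet x.1))) < -(PySem.Set.len (pvClueSet y.1))) ↔
              (pvSz y < pvSz x) := by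
            simp [pvSz, neg_lt_neg_iff]
          simp only [hiff]

lemma pvStepA (s : PySem.Set String) (o : Option (String × List (String × String)))
    (kv : String × List (String × String)) :
    (if PySem.Str.isIn "+" kv.1 then
      if pvM s kv then
        if pvSz kv > (pvEnc o).2 then (some kv.2, pvSz kv) else pvEnc o
      else pvEnc o
    else
      if PySem.Set.contains s kv.1 then
        if (pvEnc o).2 < 1 then (some kv.2, 1) else pvEnc o
      else pvEnc o) = pvEnc (pvH s o kv) := by
  cases hplus : PySem.Str.isIn "+" kv.1 with
  | true =>
      cases o with
      | none =>
          have h1 := pvSz_pos kv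
          cases hm : pvM s kv <;> simp [pvEnc, pvH, hm] <;> omega
      | some y =>
          by_cases hlt : pvSz y < pvSz kv <;>
            cases hm : pvM s kv <;>
              simp [pvEnc, pvH, hm, hlt]
  | false =>
      have hset := pvClueSet_no_plus kv.1 hplus
      have hm : pvM s kv = PySem.Set.contains s kv.1 := by
        simp [pvM, hset, PySem.Set.issubset, PySem.Set.contains]
      have hsz : pvSz kv = 1 := by simp [pvSz, hset, PySem.Set.len]
      cases o with
      | none =>
          by_cases hc : kv.1 ∈ s
          · have hcb : PySem.Set.contains s kv.1 = true := by simp [PySem.Set.contains, hc]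
            simp [pvEnc, pvH, hm, hcb, hsz, hc]
          · have hcb : PySem.Set.contains s kv.1 = false := by simp [PySem.Set.contains, hc]
            simp [pvEnc, pvH, hm, hcb, hsz, hc]
      | some y =>
          have h1 := pvSz_pos y
          by_cases hc : kv.1 ∈ s
          · have hcb : PySem.Set.contains s kv.1 = true := by simp [PySem.Set.contains, hc]
            simp [pvEnc, pvH, hm, hcb, hsz, hc, show ¬ (pvSz y < 1) by omega,
              show ¬ (pvSz y < 1 ∧ True) by omega]
          · have hcb : PySem.Set.contains s kv.1 = false := by simp [PySem.Set.contains, hc]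
            simp [pvEnc, pvH, hm, hcb, hsz, hc]

lemma pvFoldA (s : PySem.Set String) (t : List (String × List (String × String)))
    (o : Option (String × List (String × String))) :
    t.foldl
      (fun (st : Option (List (String × String)) × Int) kv =>
        if PySem.Str.isIn "+" kv.1 then
          if pvM s kv then
            if pvSz kv > st.2 then (some kv.2, pvSz kv) else st
          else st
        else
          if PySem.Set.contains s kv.1 then
            if st.2 < 1 then (some kv.2, 1) else st
          else st) (pvEnc o) = pvEnc (t.foldl (pvH s) o) := by
  induction t generalizing o with
  | nil => rfl
  | cons kv rest ih => rw [List.foldl_cons, List.foldl_cons, pvStepA s o kv, ih]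

lemma pvA_eq (discovered : List String) (theories : List (String × List (String × String))) :
    match_best_theory_py discovered theories =
      (pvEnc (theories.foldl (pvH (PySem.Set.ofList discovered)) none)).1 := by
  rw [show match_best_theory_py discovered theories =
      (theories.foldl
        (fun (st : Option (List (String × String)) × Int) kv =>
          if PySem.Str.isIn "+" kv.1 then
            if pvM (PySem.Set.ofList discovered) kv then
              if pvSz kv > st.2 then (some kv.2, pvSz kv) else st
            else st
          else
            if PySem.Set.contains (PySem.Set.ofList discovered) kv.1 then
              if st.2 < 1 then (some kv.2, 1) else st
            else st) (pvEnc none)).1 from rfl]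
  rw [pvFoldA]

-- ===== VERDICT (by name: the statement is the Claim_ definition above) =====
theorem match_best_theory_py_spec : Claim_equal_match_best_theory_py := by
  intro discovered theories _
  unfold Spec_match_best_theory_py
  have hB : match_best_theory_py_alt discovered theories =
      (theories.foldl (pvH (PySem.Set.ofList discovered)) none).map Prod.snd := by
    rw [show match_best_theory_py_alt discovered theories =
        pvFirstCovered (PySem.Set.ofList discovered)
          (PySem.List.sorted theories (fun kv => -(PySem.Set.len (pvClueSet kv.1))) false) from rfl]
    rw [pvFirstCovered_eq_find?, pvSortedFold]
  rw [pvA_eq, hB]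
  simp [pvEnc]
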